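-- pv_equiv track=rewrite | github.com/benrose258/Python | Python 3.6 Files/Classwork/CS 115/Homework 10 Music Recommender/MusicRecommenderPlus.py | findBestArtist
-- ===== SOURCE A (Python) =====
-- def findBestArtist(artistList):
--     '''Using the artistList created in mostPopularArtist, this function searches through the list and pulls out the artist or artists
--     that have the most likes. Because the list has been sorted alphabetically, the function is able to detect this by counting
--     how many times an artist appears until the next artist.'''
--     bestArtist = ([],0)
--     counter = 1
--     currentArtist = artistList[0]
--     indexnum = 0
--     while indexnum < len(artistList) - 1:
--         if artistList[indexnum + 1] == currentArtist:
--             counter += 1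
--         else:
--             if bestArtist[1] < counter:
--                 bestArtist = ([currentArtist],counter)
--                 counter = 1
--                 currentArtist = artistList[indexnum+1]
--             elif bestArtist[1] == counter:
--                 bestArtist = (bestArtist[0] + [currentArtist],counter)
--                 counter = 1
--                 currentArtist = artistList[indexnum+1]
--             else:
--                 counter = 1
--                 currentArtist = artistList[indexnum + 1]
--         indexnum += 1
--     if bestArtist[1] < counter:
--         bestArtist = ([currentArtist],counter)
--     elif bestArtist[1] == counter:
--         bestArtist = (bestArtist[0] + [currentArtist],counter)
--     return bestArtist
-- ===== SOURCE B (Python) =====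
-- def findBestArtist(artistList):
--     # Pass 1: compress the list into consecutive runs [artist, length].
--     runs = []
--     for a in artistList:
--         if runs and runs[-1][0] == a:
--             runs[-1][1] += 1
--         else:
--             runs.append([a, 1])
--     # Pass 2: find the maximum run length (runs[0] raises IndexError on empty input, like A).
--     maxlen = runs[0][1]
--     for _, l in runs:
--         if l > maxlen:
--             maxlen = l
--     # Pass 3: collect every artist whose run reaches that length, in encounter order.
--     return ([a for a, l in runs if l == maxlen], maxlen)
-- ===== Notes on version B (the rewrite author's own statement) =====
-- stated objective: simpler
-- what changed: A's single stateful while-loop over indices (best-so-far tuple, counter, current artist, with a duplicated boundary-update after the loop) is replaced by three plain passes: compress into runs, take the max run length, filter the runs; same O(n) cost.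
import Mathlib
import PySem

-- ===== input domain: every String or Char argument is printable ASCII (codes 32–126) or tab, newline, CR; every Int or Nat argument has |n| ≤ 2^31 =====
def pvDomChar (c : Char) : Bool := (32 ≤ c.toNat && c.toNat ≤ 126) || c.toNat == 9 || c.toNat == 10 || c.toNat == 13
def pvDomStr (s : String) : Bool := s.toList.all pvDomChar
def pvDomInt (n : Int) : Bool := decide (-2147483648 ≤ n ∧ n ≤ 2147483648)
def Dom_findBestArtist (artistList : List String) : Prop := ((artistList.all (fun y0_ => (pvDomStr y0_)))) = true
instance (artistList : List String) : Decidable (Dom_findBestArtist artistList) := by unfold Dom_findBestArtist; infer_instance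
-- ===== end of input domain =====

-- B replaces A's single stateful while-loop with three plain passes (compress to runs, max run length, filter); objective: simpler, same O(n) cost.

-- ===== PORT A =====
-- A's while-loop body: state = (bestArtist, counter, currentArtist), one iteration at index indexnum
def pvALoop (artistList : List String) (st : (List String × Int) × Int × String) (indexnum : Int) : (List String × Int) × Int × String :=
  if PySem.List.pyGetD artistList (indexnum + 1) "" == st.2.2 then
    (st.1, st.2.1 + 1, st.2.2)
  else if st.1.2 < st.2.1 then
    (([st.2.2], st.2.1), 1, PySem.List.pyGetD artistList (indexnum + 1) "")
  else if st.1.2 == st.2.1 then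
    ((st.1.1 ++ [st.2.2], st.2.1), 1, PySem.List.pyGetD artistList (indexnum + 1) "")
  else
    (st.1, 1, PySem.List.pyGetD artistList (indexnum + 1) "")

-- A's boundary update after the loop
def pvAFinal (st : (List String × Int) × Int × String) : List String × Int :=
  if st.1.2 < st.2.1 then ([st.2.2], st.2.1)
  else if st.1.2 == st.2.1 then (st.1.1 ++ [st.2.2], st.2.1)
  else st.1

-- artistList[0] raises IndexError on the empty list; that input is excluded by Pre_findBestArtist
def findBestArtist (artistList : List String) : List String × Int :=
  pvAFinal ((PySem.List.pyRange 0 (PySem.List.len artistList - 1) 1).foldl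
    (pvALoop artistList) ((([] : List String), (0 : Int)), (1 : Int), PySem.List.pyGetD artistList 0 ""))

-- ===== PORT B =====
-- pass 1 step of Source B: extend the run list by one artist ('runs[-1][1] += 1' or append)
def pvStepR (runs : List (String × Int)) (a : String) : List (String × Int) :=
  match runs.getLast? with
  | some kc => if kc.1 == a then runs.dropLast ++ [(kc.1, kc.2 + 1)] else runs ++ [(a, 1)]
  | none => [(a, 1)]

-- pass 2 of Source B: running max seeded with runs[0][1] (IndexError on empty runs excluded by Pre_)
def pvMaxlen (runs : List (String × Int)) : Int :=
  runs.foldl (fun m p => if p.2 > m then p.2 else m) (runs.headD ("", 0)).2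

-- pass 3 of Source B: collect the artists whose run length equals the maximum
def pvPass3 (runs : List (String × Int)) : List String × Int :=
  ((runs.filter (fun p => p.2 == pvMaxlen runs)).map Prod.fst, pvMaxlen runs)

def findBestArtist_alt (artistList : List String) : List String × Int :=
  pvPass3 (artistList.foldl pvStepR [])

-- ===== PRECONDITION & SPEC =====
-- A raises IndexError (artistList[0]) on the empty list, so Pre_ excludes exactly that input.
def Pre_findBestArtist (artistList : List String) : Prop := artistList ≠ []
instance (artistList : List String) : Decidable (Pre_findBestArtist artistList) := by unfold Pre_findBestArtist; infer_instance
def pvWitness_findBestArtist : List String := ["a", "a", "b"]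

def Spec_findBestArtist (artistList : List String) (out : List String × Int) : Prop := out = findBestArtist_alt artistList
instance (artistList : List String) (out : List String × Int) : Decidable (Spec_findBestArtist artistList out) := by unfold Spec_findBestArtist; infer_instance

-- ===== CLAIM (what is proved, stated in full; the proofs are below) =====
def Claim_equal_findBestArtist : Prop := ∀ (artistList : List String), Dom_findBestArtist artistList → Pre_findBestArtist artistList → Spec_findBestArtist artistList (findBestArtist artistList)

-- ===== LEMMAS AND PROOFS =====

-- A's loop step, once the index lookup is replaced by the element itself
def pvStepA (st : (List String × Int) × Int × String) (a : String) : (List String × Int) × Int × String :=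
  if a == st.2.2 then (st.1, st.2.1 + 1, st.2.2)
  else if st.1.2 < st.2.1 then (([st.2.2], st.2.1), 1, a)
  else if st.1.2 == st.2.1 then ((st.1.1 ++ [st.2.2], st.2.1), 1, a)
  else (st.1, 1, a)

-- maximum run length of a run list (seeded with 0), and the "best" answer it determines
def pvM (rs : List (String × Int)) : Int := rs.foldl (fun m p => max m p.2) 0
def pvBest (rs : List (String × Int)) : List String × Int :=
  ((rs.filter (fun p => p.2 == pvM rs)).map Prod.fst, pvM rs)

theorem pvLe_M (rs : List (String × Int)) : ∀ p ∈ rs, p.2 ≤ pvM rs := by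
  intro p hp
  exact (PySem.List.le_foldl_max_int rs (fun p => p.2) 0).2 p hp

theorem pvM_concat (rs : List (String × Int)) (k : String) (c : Int) :
    pvM (rs ++ [(k, c)]) = max (pvM rs) c := by
  unfold pvM
  rw [List.foldl_append]
  simp

-- the key fact: A's boundary update turns "best of rs" into "best of rs ++ [last run]"
theorem pvKey (rs : List (String × Int)) (k : String) (c : Int) :
    pvAFinal (pvBest rs, c, k) = pvBest (rs ++ [(k, c)]) := by
  unfold pvAFinal pvBest
  simp only [pvM_concat, List.filter_append, List.map_append]
  rcases lt_trichotomy (pvM rs) c with h | h | h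
  · rw [if_pos h, max_eq_right h.le]
    have h1 : rs.filter (fun p => p.2 == c) = [] := by
      rw [List.filter_eq_nil_iff]
      intro p hp
      have := pvLe_M rs p hp
      simp only [beq_iff_eq]
      omega
    simp [h1]
  · rw [if_neg (by omega), if_pos (by simp [h]), h, max_self]
    simp
  · rw [if_neg (by omega), if_neg (by simp; omega), max_eq_left h.le]
    have h2 : ¬ ((c : Int) == pvM rs) = true := by simp; omega
    simp only [List.filter_cons, List.filter_nil]
    rw [if_neg h2]
    simp

theorem pvStepA_ne (st : (List String × Int) × Int × String) (a : String) (h : ¬ a = st.2.2) :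
    pvStepA st a = (pvAFinal st, 1, a) := by
  unfold pvStepA pvAFinal
  rw [if_neg (by simpa using h)]
  split_ifs <;> rfl

-- main invariant: A's fold+finalize computes pvBest of the run list B builds
theorem pvMain (t : List String) : ∀ (rs : List (String × Int)) (cur : String) (counter : Int),
    pvAFinal (t.foldl pvStepA (pvBest rs, counter, cur)) =
      pvBest (t.foldl pvStepR (rs ++ [(cur, counter)])) := by
  induction t with
  | nil => intro rs cur counter; exact pvKey rs cur counter
  | cons a t ih =>
    intro rs cur counter
    simp only [List.foldl_cons]
    by_cases h : a = cur
    · have hA : pvStepA (pvBest rs, counter, cur) a = (pvBest rs, counter + 1, cur) := by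
        unfold pvStepA; rw [if_pos (by simpa using h)]
      have hR : pvStepR (rs ++ [(cur, counter)]) a = rs ++ [(cur, counter + 1)] := by
        unfold pvStepR
        rw [List.getLast?_concat]
        simp [h]
      rw [hA, hR]
      exact ih rs cur (counter + 1)
    · rw [pvStepA_ne _ _ (by simpa using h), pvKey rs cur counter]
      have hR : pvStepR (rs ++ [(cur, counter)]) a = (rs ++ [(cur, counter)]) ++ [(a, 1)] := by
        unfold pvStepR
        rw [List.getLast?_concat]
        dsimp only
        rw [if_neg (by simp only [beq_iff_eq]; exact fun e => h e.symm)]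
      rw [hR]
      exact ih (rs ++ [(cur, counter)]) a 1

-- run lists built by pass 1 are nonempty with all lengths ≥ 1
theorem pvRunsPos (t : List String) : ∀ (rs : List (String × Int)), rs ≠ [] → (∀ p ∈ rs, 1 ≤ p.2) →
    t.foldl pvStepR rs ≠ [] ∧ ∀ p ∈ t.foldl pvStepR rs, 1 ≤ p.2 := by
  induction t with
  | nil => intro rs h1 h2; exact ⟨h1, h2⟩
  | cons a t ih =>
    intro rs h1 h2
    simp only [List.foldl_cons]
    have hlast : ∃ kc, rs.getLast? = some kc := by
      cases rs with
      | nil => exact absurd rfl h1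
      | cons r rs' => exact ⟨(r :: rs').getLast (by simp), List.getLast?_eq_some_getLast (by simp)⟩
    obtain ⟨⟨k, c⟩, hkc⟩ := hlast
    have hkcmem : (k, c) ∈ rs := List.mem_of_getLast? hkc
    unfold pvStepR
    rw [hkc]
    dsimp only
    split_ifs with h
    · apply ih
      · simp
      · intro p hp
        rcases List.mem_append.1 hp with hp | hp
        · exact h2 p ((List.dropLast_sublist rs).subset hp)
        · have := h2 (k, c) hkcmem
          simp at hp ⊢
          rcases hp with ⟨hp1, hp2⟩
          simp at this
          omega
    · apply ih
      · simp
      · intro p hp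
        rcases List.mem_append.1 hp with hp | hp
        · exact h2 p hp
        · simp at hp
          simp [hp]

-- A's index-driven fold over range(len-1) equals the element-driven fold over the tail
theorem pvBridgeA (x : String) (t : List String) :
    findBestArtist (x :: t) = pvAFinal (t.foldl pvStepA ((([], 0), 1, x))) := by
  unfold findBestArtist
  have hlen : PySem.List.len (x :: t) = (t.length : Int) + 1 := by
    simp [PySem.List.len]
  rw [hlen]
  have hrange : PySem.List.pyRange 0 ((t.length : Int) + 1 - 1) 1
      = (List.range t.length).map (fun (k : ℕ) => (0 : Int) + (k : Int)) := by
    rw [show ((t.length : Int) + 1 - 1) = (t.length : Int) by ring]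
    rw [PySem.List.pyRange_one]
    congr 1
  rw [hrange, List.foldl_map]
  have hget0 : PySem.List.pyGetD (x :: t) 0 "" = x := by
    simp
  rw [hget0]
  have hfold : ∀ (l : List ℕ) (st : (List String × Int) × Int × String),
      l.foldl (fun st (k : ℕ) => pvALoop (x :: t) st ((0 : Int) + (k : Int))) st
      = l.foldl (fun st k => pvStepA st (t.getD k "")) st := by
    intro l
    induction l with
    | nil => intro st; rfl
    | cons k l ihl =>
      intro st
      simp only [List.foldl_cons]
      have hgk : PySem.List.pyGetD (x :: t) ((0 : Int) + (k : Int) + 1) "" = t.getD k "" := by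
        rw [show ((0 : Int) + (k : Int) + 1) = ((k + 1 : ℕ) : Int) by push_cast; ring]
        rw [PySem.List.pyGetD_natCast]
        simp
      have hstep : pvALoop (x :: t) st ((0 : Int) + (k : Int)) = pvStepA st (t.getD k "") := by
        unfold pvALoop pvStepA
        rw [hgk]
      rw [hstep, ihl]
  rw [hfold]
  congr 1
  have hmap : (List.range t.length).map (fun k => t.getD k "") = t := by
    apply List.ext_getElem (by simp)
    intro i h1 h2
    simp [List.getElem?_eq_getElem h2]
  rw [← List.foldl_map, hmap]

-- B's seeded running max equals the 0-seeded max once runs is nonempty with lengths ≥ 1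
theorem pvMaxlen_eq (runs : List (String × Int)) (hne : runs ≠ []) (hpos : ∀ p ∈ runs, 1 ≤ p.2) :
    pvMaxlen runs = pvM runs := by
  cases runs with
  | nil => exact absurd rfl hne
  | cons q qs =>
    have hq2 : 1 ≤ q.2 := hpos q (by simp)
    unfold pvMaxlen pvM
    have hmaxfun : (fun (m : Int) (p : String × Int) => if p.2 > m then p.2 else m)
        = fun m p => max m p.2 := by
      funext m p
      simp [max_def]
      split_ifs <;> omega
    rw [hmaxfun]
    simp only [List.headD_cons, List.foldl_cons, max_self]
    rw [show max (0 : Int) q.2 = q.2 by omega]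

theorem pvBridgeB (x : String) (t : List String) :
    findBestArtist_alt (x :: t) = pvBest (t.foldl pvStepR [(x, 1)]) := by
  unfold findBestArtist_alt
  have h0 : ((x :: t).foldl pvStepR []) = t.foldl pvStepR [(x, 1)] := by
    simp only [List.foldl_cons]; rfl
  rw [h0]
  obtain ⟨hne, hpos⟩ := pvRunsPos t [(x, 1)] (by simp) (by simp)
  unfold pvPass3 pvBest
  rw [pvMaxlen_eq _ hne hpos]

-- ===== VERDICT (by name: the statement is the Claim_ definition above) =====
theorem findBestArtist_spec : Claim_equal_findBestArtist := by
  intro artistList _ hpre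
  unfold Spec_findBestArtist
  cases artistList with
  | nil => exact absurd rfl hpre
  | cons x t =>
    rw [pvBridgeA, pvBridgeB]
    have := pvMain t [] x 1
    simpa using this
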